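-- pv_equiv track=rewrite | github.com/zyrgit/GreenDriveCode | sumo_road.py | find_best_lane_ind_set
-- ===== SOURCE A (Python) =====
-- def find_best_lane_ind_set(correct, target):
-- 	# return indices in correct that are closest to target elements.
-- 	assert len(correct)>0 and len(target)>0, str(correct)+","+str(target)
-- 	inters = correct & target
-- 	if len(inters)>0: return inters
-- 	minDiff = 1e6
-- 	for i in correct:
-- 		for j in target:
-- 			if abs(i-j)<minDiff:
-- 				minDiff=abs(i-j)
-- 				inters=set([i])
-- 			elif abs(i-j)==minDiff:
-- 				inters.add(i)
-- 	assert len(inters)>0, "?"+str(correct)+","+str(target)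
-- 	return inters
-- ===== SOURCE B (Python) =====
-- def find_best_lane_ind_set(correct, target):
--     # common elements are at distance 0: keep the set-intersection early return,
--     # then sort target once and binary-search each element of correct for its
--     # nearest distance, collecting the elements that attain the global minimum.
--     inter = correct & target
--     if inter:
--         return inter
--     t = sorted(target)
--     n = len(t)
--
--     def nearest(x):
--         lo, hi = 0, n
--         while lo < hi:
--             mid = (lo + hi) // 2
--             if t[mid] < x:
--                 lo = mid + 1
--             else:
--                 hi = mid
--         d = t[lo] - x if lo < n else x - t[lo - 1]
--         if lo > 0 and x - t[lo - 1] < d: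
--             d = x - t[lo - 1]
--         return d
--
--     dists = [nearest(x) for x in correct]
--     m = min(dists)
--     return {x for x, d in zip(correct, dists) if d == m}
-- ===== Notes on version B (the rewrite author's own statement) =====
-- stated objective: alternative
-- what changed: B keeps the set-intersection early return but replaces A's all-pairs double loop (running minimum with reset/add set bookkeeping) by sorting target once and binary-searching each element of correct for its nearest distance, then collecting the elements that attain the global minimum.
import Mathlib
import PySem

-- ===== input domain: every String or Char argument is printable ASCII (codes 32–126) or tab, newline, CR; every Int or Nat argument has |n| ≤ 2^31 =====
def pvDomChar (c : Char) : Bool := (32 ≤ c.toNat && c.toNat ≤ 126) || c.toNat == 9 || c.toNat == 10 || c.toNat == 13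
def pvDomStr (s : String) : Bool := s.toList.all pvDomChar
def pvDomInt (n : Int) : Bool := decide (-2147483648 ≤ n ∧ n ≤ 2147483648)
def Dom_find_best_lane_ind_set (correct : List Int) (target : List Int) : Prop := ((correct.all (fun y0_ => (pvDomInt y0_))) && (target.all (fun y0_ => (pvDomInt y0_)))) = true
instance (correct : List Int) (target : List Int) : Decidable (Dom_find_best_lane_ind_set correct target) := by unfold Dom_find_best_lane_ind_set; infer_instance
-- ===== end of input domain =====

-- B keeps the set-intersection early return but replaces A's all-pairs double loop by sorting
-- target once and binary-searching each element of correct for its nearest distance (objective: alternative).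

-- ===== PORT A =====
def find_best_lane_ind_set (correct : List Int) (target : List Int) : List Int :=
  -- inters = correct & target  (the parameters are Python sets)
  let inters : List Int := PySem.Set.inter correct target
  if inters.length > 0 then inters
  else
    -- minDiff = 1e6: an integral float compared only with Ints, so Int 1000000 is exact here
    let r := correct.foldl (fun (st : Int × List Int) i =>
        target.foldl (fun (st : Int × List Int) j =>
          if |i - j| < st.1 then (|i - j|, [i])
          else if |i - j| = st.1 then (st.1, PySem.Set.add st.2 i)
          else st) st) (1000000, inters)
    r.2

-- ===== PORT B =====
-- the while loop, with fuel: hi - lo shrinks each round, so fuel = initial hi - lo suffices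
def pvBisect (t : List Int) (x : Int) : Nat → Nat → Nat → Nat
  | 0, lo, _ => lo
  | fuel + 1, lo, hi =>
    if lo < hi then
      let mid := (lo + hi) / 2
      if t.getD mid 0 < x then pvBisect t x fuel (mid + 1) hi else pvBisect t x fuel lo mid
    else lo

def pvNearest (t : List Int) (x : Int) : Int :=
  let n := t.length
  let lo := pvBisect t x n 0 n
  -- in-range indexing ported with getD (Python indexes out of range only for empty t, excluded by Pre_)
  let d := if lo < n then t.getD lo 0 - x else x - t.getD (lo - 1) 0
  if 0 < lo ∧ x - t.getD (lo - 1) 0 < d then x - t.getD (lo - 1) 0 else d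

def find_best_lane_ind_set_alt (correct : List Int) (target : List Int) : List Int :=
  let inter := PySem.Set.inter correct target
  if inter ≠ [] then inter
  else
  let t := PySem.List.sorted target (fun j => j) false
  let dists := correct.map (fun x => pvNearest t x)
  match PySem.List.min? dists (fun d => d) with
  | none => []   -- min([]) raises ValueError; empty correct is outside Pre_
  | some m => PySem.Set.ofList (((correct.zip dists).filter (fun p => decide (p.2 = m))).map (fun p => p.1))

-- ===== PRECONDITION & SPEC =====
-- The parameters are Python sets, so Pre_ requires duplicate-free lists; it also excludes exactly
-- the inputs on which A raises AssertionError: an empty argument, and arguments in which every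
-- pair of elements is more than 1e6 apart (the loop then never populates the empty `inters`).
def Pre_find_best_lane_ind_set (correct : List Int) (target : List Int) : Prop :=
  correct ≠ [] ∧ target ≠ [] ∧ correct.Nodup ∧ target.Nodup ∧
    (correct.any (fun i => target.any (fun j => |i - j| ≤ 1000000))) = true
instance (correct : List Int) (target : List Int) : Decidable (Pre_find_best_lane_ind_set correct target) := by unfold Pre_find_best_lane_ind_set; infer_instance
def pvWitness_find_best_lane_ind_set : List Int × List Int := ([3, 10], [5])

def Spec_find_best_lane_ind_set (correct : List Int) (target : List Int) (out : List Int) : Prop := out = find_best_lane_ind_set_alt correct target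
instance (correct : List Int) (target : List Int) (out : List Int) : Decidable (Spec_find_best_lane_ind_set correct target out) := by unfold Spec_find_best_lane_ind_set; infer_instance

-- ===== CLAIM (what is proved, stated in full; the proofs are below) =====
def Claim_equal_find_best_lane_ind_set : Prop := ∀ (correct : List Int) (target : List Int), Dom_find_best_lane_ind_set correct target → Pre_find_best_lane_ind_set correct target → Spec_find_best_lane_ind_set correct target (find_best_lane_ind_set correct target)
-- ===== LEMMAS AND PROOFS =====

-- min distance from i to the elements of a (nonempty) list, as a running min
def pvPD (target : List Int) (i : Int) : Int :=
  match target with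
  | [] => 0
  | j :: js => js.foldl (fun a j' => min a |i - j'|) |i - j|

-- generic running-min facts
theorem pv_gmin_le_init (f : Int → Int) (l : List Int) (a : Int) :
    l.foldl (fun x y => min x (f y)) a ≤ a := by
  induction l generalizing a with
  | nil => simp
  | cons b bs ih => exact le_trans (ih _) (min_le_left _ _)

theorem pv_gmin_le_mem (f : Int → Int) (l : List Int) (a b : Int) (hb : b ∈ l) :
    l.foldl (fun x y => min x (f y)) a ≤ f b := by
  induction l generalizing a with
  | nil => cases hb
  | cons c cs ih =>
    rcases List.mem_cons.1 hb with h | h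
    · subst h; exact le_trans (pv_gmin_le_init f cs _) (min_le_right _ _)
    · exact ih _ h

theorem pv_gmin_cases (f : Int → Int) (l : List Int) (a : Int) :
    l.foldl (fun x y => min x (f y)) a = a ∨ ∃ b ∈ l, l.foldl (fun x y => min x (f y)) a = f b := by
  induction l generalizing a with
  | nil => left; rfl
  | cons c cs ih =>
    rcases ih (min a (f c)) with h | ⟨b, hb, h⟩
    · simp only [List.foldl_cons] at *
      rcases le_total a (f c) with hle | hle
      · left; rw [h, min_eq_left hle]
      · right; exact ⟨c, List.mem_cons_self, by rw [h, min_eq_right hle]⟩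
    · right; exact ⟨b, List.mem_cons_of_mem _ hb, h⟩

theorem pv_gmin_min (f : Int → Int) (l : List Int) (a b : Int) :
    l.foldl (fun x y => min x (f y)) (min a b) = min a (l.foldl (fun x y => min x (f y)) b) := by
  induction l generalizing b with
  | nil => rfl
  | cons c cs ih => simp only [List.foldl_cons, min_assoc, ih]

theorem pvPD_le (target : List Int) (i j : Int) (hj : j ∈ target) : pvPD target i ≤ |i - j| := by
  cases target with
  | nil => cases hj
  | cons t ts =>
    rcases List.mem_cons.1 hj with h | h
    · subst h; exact pv_gmin_le_init _ _ _
    · exact pv_gmin_le_mem _ _ _ _ h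

theorem pvPD_attained (target : List Int) (i : Int) (h : target ≠ []) :
    ∃ j ∈ target, pvPD target i = |i - j| := by
  cases target with
  | nil => exact absurd rfl h
  | cons t ts =>
    rcases pv_gmin_cases (fun j' => |i - j'|) ts |i - t| with h | ⟨b, hb, hh⟩
    · exact ⟨t, List.mem_cons_self, h⟩
    · exact ⟨b, List.mem_cons_of_mem _ hb, hh⟩

theorem pvPD_cons₂ (tj j' : Int) (l' : List Int) (i : Int) :
    pvPD (tj :: j' :: l') i = min |i - tj| (pvPD (j' :: l') i) := by
  show l'.foldl (fun a j => min a |i - j|) (min |i - tj| |i - j'|) = _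
  exact pv_gmin_min _ _ _ _

theorem pvPD_perm (l l' : List Int) (x : Int) (hp : l.Perm l') (h : l ≠ []) :
    pvPD l x = pvPD l' x := by
  have h' : l' ≠ [] := by
    intro he; subst he; exact h (List.Perm.eq_nil hp)
  refine le_antisymm ?_ ?_
  · obtain ⟨j, hj, he⟩ := pvPD_attained l' x h'
    rw [he]; exact pvPD_le l x j (hp.mem_iff.mpr hj)
  · obtain ⟨j, hj, he⟩ := pvPD_attained l x h
    rw [he]; exact pvPD_le l' x j (hp.mem_iff.mp hj)

-- Set.add is idempotent in the second argument
theorem pv_add_add (s : List Int) (i : Int) :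
    PySem.Set.add (PySem.Set.add s i) i = PySem.Set.add s i := by
  simp [PySem.Set.add, PySem.Set.contains]
  split <;> simp_all

-- the inner loop of A over a nonempty target
theorem pv_inner (i : Int) (tjs : List Int) : ∀ (tj md : Int) (s : List Int),
    (tj :: tjs).foldl (fun st j =>
        if |i - j| < st.1 then (|i - j|, [i])
        else if |i - j| = st.1 then (st.1, PySem.Set.add st.2 i)
        else st) (md, s)
      = (min md (pvPD (tj :: tjs) i),
         if pvPD (tj :: tjs) i < md then [i]
         else if pvPD (tj :: tjs) i = md then PySem.Set.add s i else s) := by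
  induction tjs with
  | nil =>
    intro tj md s
    simp only [List.foldl_cons, List.foldl_nil, pvPD]
    rcases lt_trichotomy |i - tj| md with h | h | h
    · rw [if_pos h, if_pos h]
      simp [min_eq_right h.le]
    · rw [if_neg (by omega), if_pos h, if_neg (by omega), if_pos h]
      simp [min_eq_right h.le]; omega
    · rw [if_neg (by omega), if_neg (by omega), if_neg (by omega), if_neg (by omega)]
      simp [min_eq_left h.le]
  | cons j' l' ih =>
    intro tj md s
    rw [pvPD_cons₂]
    have step : (tj :: j' :: l').foldl (fun st j =>
        if |i - j| < st.1 then (|i - j|, [i])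
        else if |i - j| = st.1 then (st.1, PySem.Set.add st.2 i)
        else st) (md, s) = (j' :: l').foldl (fun st j =>
        if |i - j| < st.1 then (|i - j|, [i])
        else if |i - j| = st.1 then (st.1, PySem.Set.add st.2 i)
        else st)
        (if |i - tj| < md then (|i - tj|, [i])
         else if |i - tj| = md then (md, PySem.Set.add s i)
         else (md, s)) := by
      rfl
    rw [step]
    rcases lt_trichotomy |i - tj| md with h | h | h
    · rw [if_pos h]
      rw [ih, Prod.mk.injEq]
      refine ⟨by omega, ?_⟩
      split_ifs <;>
        first
          | rfl
          | omega
          | (exfalso; omega)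
          | (rw [pv_add_add])
          | (simp [PySem.Set.add, PySem.Set.contains])
    · rw [if_neg (by omega), if_pos h]
      rw [ih, Prod.mk.injEq]
      refine ⟨by omega, ?_⟩
      split_ifs <;>
        first
          | rfl
          | omega
          | (exfalso; omega)
          | (rw [pv_add_add])
          | (simp [PySem.Set.add, PySem.Set.contains])
    · rw [if_neg (by omega), if_neg (by omega)]
      rw [ih, Prod.mk.injEq]
      refine ⟨by omega, ?_⟩
      split_ifs <;>
        first
          | rfl
          | omega
          | (exfalso; omega)
          | (rw [pv_add_add])
          | (simp [PySem.Set.add, PySem.Set.contains])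

-- conditional-add fold is fold of add over the filtered list
theorem pv_condadd (p : Int → Prop) [DecidablePred p] (l : List Int) (s : List Int) :
    l.foldl (fun acc i => if p i then PySem.Set.add acc i else acc) s
      = (l.filter (fun i => decide (p i))).foldl PySem.Set.add s := by
  induction l generalizing s with
  | nil => rfl
  | cons c cs ih => simp only [List.foldl_cons, List.filter_cons]; split <;> simp_all

-- the outer loop of A over a nonempty target
theorem pv_outer (tj : Int) (tjs : List Int) (c : List Int) : ∀ (md : Int) (s : List Int),
    c.foldl (fun st i =>
        (tj :: tjs).foldl (fun st j =>
          if |i - j| < st.1 then (|i - j|, [i])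
          else if |i - j| = st.1 then (st.1, PySem.Set.add st.2 i)
          else st) st) (md, s)
      = (c.foldl (fun a i => min a (pvPD (tj :: tjs) i)) md,
         if c.foldl (fun a i => min a (pvPD (tj :: tjs) i)) md < md then
           PySem.Set.ofList (c.filter (fun i => decide (pvPD (tj :: tjs) i = c.foldl (fun a i => min a (pvPD (tj :: tjs) i)) md)))
         else c.foldl (fun acc i => if pvPD (tj :: tjs) i = md then PySem.Set.add acc i else acc) s) := by
  induction c with
  | nil =>
    intro md s
    simp
  | cons i rest ih =>
    intro md s
    rw [List.foldl_cons, pv_inner]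
    rw [show List.foldl (fun a i => min a (pvPD (tj :: tjs) i)) md (i :: rest)
          = List.foldl (fun a i => min a (pvPD (tj :: tjs) i)) (min md (pvPD (tj :: tjs) i)) rest from rfl]
    rw [show List.foldl (fun acc i => if pvPD (tj :: tjs) i = md then PySem.Set.add acc i else acc) s (i :: rest)
          = List.foldl (fun acc i => if pvPD (tj :: tjs) i = md then PySem.Set.add acc i else acc)
              (if pvPD (tj :: tjs) i = md then PySem.Set.add s i else s) rest from rfl]
    have hle := pv_gmin_le_init (fun k => pvPD (tj :: tjs) k) rest (min md (pvPD (tj :: tjs) i))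
    rcases lt_trichotomy (pvPD (tj :: tjs) i) md with h | h | h
    · -- strict improvement: state resets to [i]
      rw [if_pos h, min_eq_right h.le, ih]
      have hle' : List.foldl (fun a k => min a (pvPD (tj :: tjs) k)) (pvPD (tj :: tjs) i) rest
          ≤ pvPD (tj :: tjs) i := pv_gmin_le_init _ _ _
      rcases lt_or_eq_of_le hle' with h2 | h2
      · rw [if_pos h2, if_pos (by omega), List.filter_cons, if_neg (by simp; omega)]
      · rw [if_neg (by omega), if_pos (by omega), List.filter_cons, if_pos (by simp [h2]),
            pv_condadd (fun k => pvPD (tj :: tjs) k = pvPD (tj :: tjs) i)]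
        have hpred : (fun k => decide (pvPD (tj :: tjs) k
              = List.foldl (fun a k => min a (pvPD (tj :: tjs) k)) (pvPD (tj :: tjs) i) rest))
            = (fun k => decide (pvPD (tj :: tjs) k = pvPD (tj :: tjs) i)) := by
          funext k; rw [h2]
        rw [hpred, PySem.Set.ofList_eq_foldl, List.foldl_cons]
        rfl
    · -- equal: i is added
      rw [if_neg (by omega), if_pos h, min_eq_left h.ge, ih]
      split_ifs with h2
      · rw [List.filter_cons, if_neg (by simp; omega)]
      · rfl
    · -- worse: nothing changes
      rw [if_neg (by omega), if_neg (by omega), min_eq_left h.le, ih]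
      split_ifs with h2
      · rw [List.filter_cons, if_neg (by simp; omega)]
      · rfl

-- binary search: pvBisect finds the first index whose element is ≥ x
theorem pv_bisect_spec (t : List Int) (x : Int) (hs : t.Pairwise (· ≤ ·)) :
    ∀ fuel lo hi, hi - lo ≤ fuel → lo ≤ hi → hi ≤ t.length →
    (∀ k (hk : k < t.length), k < lo → t[k] < x) →
    (∀ k (hk : k < t.length), hi ≤ k → x ≤ t[k]) →
    lo ≤ pvBisect t x fuel lo hi ∧ pvBisect t x fuel lo hi ≤ hi ∧
    (∀ k (hk : k < t.length), k < pvBisect t x fuel lo hi → t[k] < x) ∧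
    (∀ k (hk : k < t.length), pvBisect t x fuel lo hi ≤ k → x ≤ t[k]) := by
  have hpw := List.pairwise_iff_getElem.mp hs
  intro fuel
  induction fuel with
  | zero =>
    intro lo hi hf hlh hhl hlow hhigh
    have heq : hi = lo := by omega
    subst heq
    simp only [pvBisect]
    exact ⟨le_refl _, le_refl _, hlow, hhigh⟩
  | succ fuel ih =>
    intro lo hi hf hlh hhl hlow hhigh
    simp only [pvBisect]
    by_cases h : lo < hi
    · rw [if_pos h]
      have hmidlen : (lo + hi) / 2 < t.length := by omega
      rw [List.getD_eq_getElem t 0 hmidlen]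
      by_cases hcmp : t[(lo + hi) / 2] < x
      · rw [if_pos hcmp]
        have hlow' : ∀ k (hk : k < t.length), k < (lo + hi) / 2 + 1 → t[k] < x := by
          intro k hk hklt
          rcases Nat.lt_succ_iff_lt_or_eq.mp hklt with h' | h'
          · exact lt_of_le_of_lt (hpw k ((lo + hi) / 2) hk hmidlen h') hcmp
          · subst h'; exact hcmp
        have hrec := ih ((lo + hi) / 2 + 1) hi (by omega) (by omega) hhl hlow' hhigh
        exact ⟨by omega, hrec.2.1, hrec.2.2.1, hrec.2.2.2⟩
      · rw [if_neg hcmp]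
        have hhigh' : ∀ k (hk : k < t.length), (lo + hi) / 2 ≤ k → x ≤ t[k] := by
          intro k hk hge
          rcases Nat.eq_or_lt_of_le hge with h' | h'
          · subst h'; omega
          · exact le_trans (by omega) (hpw ((lo + hi) / 2) k hmidlen hk h')
        have hrec := ih lo ((lo + hi) / 2) (by omega) (by omega) (by omega) hlow hhigh'
        exact ⟨hrec.1, by omega, hrec.2.2.1, hrec.2.2.2⟩
    · rw [if_neg h]
      have heq : hi = lo := by omega
      subst heq
      exact ⟨le_refl _, le_refl _, hlow, hhigh⟩

-- pvNearest on a sorted nonempty list computes the minimum distance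
theorem pv_nearest_sorted (t : List Int) (x : Int) (ht : t ≠ []) (hs : t.Pairwise (· ≤ ·)) :
    pvNearest t x = pvPD t x := by
  have hlen : 0 < t.length := List.length_pos_iff.mpr ht
  obtain ⟨hr0, hrn, hblow, hbhigh⟩ := pv_bisect_spec t x hs t.length 0 t.length
    (by omega) (by omega) (by omega) (by omega) (by intro k hk hge; omega)
  set r := pvBisect t x t.length 0 t.length with hr
  show (if 0 < r ∧ x - t.getD (r - 1) 0 < (if r < t.length then t.getD r 0 - x else x - t.getD (r - 1) 0) then
      x - t.getD (r - 1) 0 else (if r < t.length then t.getD r 0 - x else x - t.getD (r - 1) 0)) = pvPD t x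
  have hub : ∀ v ∈ t, pvPD t x ≤ |x - v| := by
    intro v hv
    exact pvPD_le t x v hv
  have key : ∀ res : Int, ((∃ k : Nat, ∃ hk : k < t.length, res = |x - t[k]|) ∧
      (∀ k (hk : k < t.length), res ≤ |x - t[k]|)) → res = pvPD t x := by
    intro res ⟨⟨k, hk, hkev⟩, hall⟩
    refine le_antisymm ?_ ?_
    · obtain ⟨j, hj, hjv⟩ := pvPD_attained t x ht
      obtain ⟨m, hm, hmv⟩ := List.mem_iff_getElem.mp hj
      rw [hjv, ← hmv]; exact hall m hm
    · rw [hkev]; exact hub _ (List.getElem_mem hk)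
  apply key
  constructor
  · by_cases hc : 0 < r ∧ x - t.getD (r - 1) 0 < (if r < t.length then t.getD r 0 - x else x - t.getD (r - 1) 0)
    · rw [if_pos hc]
      have hrl : r - 1 < t.length := by omega
      refine ⟨r - 1, hrl, ?_⟩
      rw [List.getD_eq_getElem t 0 hrl]
      have := hblow (r - 1) hrl (by omega)
      rw [abs_of_pos (by omega)]
    · rw [if_neg hc]
      by_cases hrlt : r < t.length
      · rw [if_pos hrlt]
        refine ⟨r, hrlt, ?_⟩
        rw [List.getD_eq_getElem t 0 hrlt]
        have := hbhigh r hrlt (le_refl _)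
        rw [abs_of_nonpos (by omega)]; ring
      · rw [if_neg hrlt]
        have hrl : r - 1 < t.length := by omega
        refine ⟨r - 1, hrl, ?_⟩
        rw [List.getD_eq_getElem t 0 hrl]
        have := hblow (r - 1) hrl (by omega)
        rw [abs_of_pos (by omega)]
  · intro k hk
    have hpw := List.pairwise_iff_getElem.mp hs
    by_cases hkr : k < r
    · have htk := hblow k hk hkr
      have hrl : r - 1 < t.length := by omega
      have hmono : t[k] ≤ t[r - 1] := by
        rcases Nat.eq_or_lt_of_le (by omega : k ≤ r - 1) with h' | h'
        · subst h'; exact le_refl _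
        · exact hpw k (r - 1) hk hrl h'
      have habs : |x - t[k]| = x - t[k] := abs_of_pos (by omega)
      rw [habs]
      have hd : x - t.getD (r - 1) 0 ≤ x - t[k] := by
        rw [List.getD_eq_getElem t 0 hrl]; omega
      by_cases hc : 0 < r ∧ x - t.getD (r - 1) 0 < (if r < t.length then t.getD r 0 - x else x - t.getD (r - 1) 0)
      · rw [if_pos hc]; exact hd
      · rw [if_neg hc]
        push_neg at hc
        have := hc (by omega)
        by_cases hrlt : r < t.length
        · rw [if_pos hrlt] at *; omega
        · rw [if_neg hrlt] at *; exact hd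
    · have hrlt : r < t.length := by omega
      have htk := hbhigh k hk (by omega)
      have hmono : t[r] ≤ t[k] := by
        rcases Nat.eq_or_lt_of_le (by omega : r ≤ k) with h' | h'
        · subst h'; exact le_refl _
        · exact hpw r k hrlt hk h'
      have habs : |x - t[k]| = t[k] - x := by rw [abs_of_nonpos (by omega)]; ring
      rw [habs]
      rw [if_pos hrlt]
      by_cases hc : 0 < r ∧ x - t.getD (r - 1) 0 < t.getD r 0 - x
      · rw [if_pos hc]
        rw [List.getD_eq_getElem t 0 hrlt] at hc
        omega
      · rw [if_neg hc]
        rw [List.getD_eq_getElem t 0 hrlt]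
        omega

-- zip-with-its-map, filtered on the second component, projects to a plain filter
theorem pv_zipfilter (c : List Int) (f : Int → Int) (m : Int) :
    (((c.zip (c.map f)).filter (fun p => decide (p.2 = m))).map (fun p => p.1))
      = c.filter (fun i => decide (f i = m)) := by
  induction c with
  | nil => rfl
  | cons a l ih => simp only [List.map_cons, List.zip_cons_cons, List.filter_cons]; split <;> simp_all

theorem find_best_lane_ind_set_spec : Claim_equal_find_best_lane_ind_set := by
  intro c t _ hpre
  obtain ⟨hc, ht, hnodc, hnodt, hany⟩ := hpre
  obtain ⟨tj, tjs, rfl⟩ := List.exists_cons_of_ne_nil ht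
  obtain ⟨c0, cs, rfl⟩ := List.exists_cons_of_ne_nil hc
  unfold Spec_find_best_lane_ind_set
  have htne : (tj :: tjs) ≠ [] := List.cons_ne_nil _ _
  simp only [find_best_lane_ind_set, find_best_lane_ind_set_alt]
  by_cases hI : (PySem.Set.inter (c0 :: cs) (tj :: tjs)).length > 0
  · -- both sides return the intersection
    rw [if_pos hI, if_pos (by intro he; rw [he] at hI; simp at hI)]
  · -- empty intersection: A's double loop vs B's sort + binary search
    have hIe : PySem.Set.inter (c0 :: cs) (tj :: tjs) = [] := by
      cases h : PySem.Set.inter (c0 :: cs) (tj :: tjs) with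
      | nil => rfl
      | cons a l => rw [h] at hI; simp at hI
    rw [if_neg hI, hIe, if_neg (by simp)]
    set T := PySem.List.sorted (tj :: tjs) (fun j => j) false with hT
    have hTperm : T.Perm (tj :: tjs) := PySem.List.sorted_perm _ _ _
    have hTne : T ≠ [] := by
      intro he; rw [hT, PySem.List.sorted_eq_nil_iff] at he; exact htne he
    have hTpw : T.Pairwise (· ≤ ·) := PySem.List.sorted_pairwise (tj :: tjs) (fun j => j)
    have hnear : ∀ x : Int, pvNearest T x = pvPD (tj :: tjs) x :=
      fun x => (pv_nearest_sorted T x hTne hTpw).trans (pvPD_perm T (tj :: tjs) x hTperm hTne)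
    set M := cs.foldl (fun a i => min a (pvPD (tj :: tjs) i)) (pvPD (tj :: tjs) c0) with hM
    have hmap : (c0 :: cs).map (fun x => pvNearest T x) = (c0 :: cs).map (fun x => pvPD (tj :: tjs) x) :=
      List.map_congr_left (fun x _ => hnear x)
    have hmin : PySem.List.min? ((c0 :: cs).map (fun x => pvPD (tj :: tjs) x)) (fun d => d) = some M := by
      rw [List.map_cons, PySem.List.min?_id_cons, List.foldl_map]
    have halt : (match PySem.List.min? ((c0 :: cs).map (fun x => pvNearest T x)) (fun d => d) with
          | none => ([] : List Int)
          | some m => PySem.Set.ofList ((((c0 :: cs).zip ((c0 :: cs).map (fun x => pvNearest T x))).filter (fun p : Int × Int => decide (p.2 = m))).map (fun p : Int × Int => p.1)))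
        = PySem.Set.ofList ((c0 :: cs).filter (fun i => decide (pvPD (tj :: tjs) i = M))) := by
      rw [hmap, hmin]
      show PySem.Set.ofList ((((c0 :: cs).zip ((c0 :: cs).map (fun x => pvPD (tj :: tjs) x))).filter (fun p : Int × Int => decide (p.2 = M))).map (fun p : Int × Int => p.1)) = _
      rw [pv_zipfilter]
    rw [halt]
    have hMle : ∀ i ∈ c0 :: cs, M ≤ pvPD (tj :: tjs) i := by
      intro i hi
      rcases List.mem_cons.1 hi with h | h
      · subst h; exact pv_gmin_le_init _ _ _
      · exact pv_gmin_le_mem _ _ _ _ h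
    rw [pv_outer]
    have hG : (c0 :: cs).foldl (fun a i => min a (pvPD (tj :: tjs) i)) 1000000 = min 1000000 M := by
      rw [List.foldl_cons]
      exact pv_gmin_min _ _ _ _
    have hM6 : M ≤ 1000000 := by
      simp only [List.any_eq_true, decide_eq_true_eq] at hany
      obtain ⟨i, hi, j, hj, hle⟩ := hany
      exact le_trans (hMle i hi) (le_trans (pvPD_le _ _ _ hj) hle)
    have hGM : min (1000000 : Int) M = M := by omega
    rw [hG, hGM]
    rcases lt_or_eq_of_le hM6 with h6 | h6
    · rw [if_pos h6]
    · rw [if_neg (by omega),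
          pv_condadd (fun i => pvPD (tj :: tjs) i = 1000000) (c0 :: cs) [],
          ← PySem.Set.ofList_eq_foldl]
      have : (c0 :: cs).filter (fun i => decide (pvPD (tj :: tjs) i = 1000000))
          = (c0 :: cs).filter (fun i => decide (pvPD (tj :: tjs) i = M)) := by
        refine List.filter_congr ?_
        intro i _
        rw [h6]
      rw [this]
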